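-- pv_equiv track=rewrite | github.com/MolfarUA/CodeWars_Solutions | 1 kyu/Regular Expression for Binary Numbers Divisible by n/solution.py | create_NFA
-- ===== SOURCE A (Python) =====
-- def create_NFA(n):
--     vec = []
--     for i in range(0, n):
--         vec.append([i, '0'])
--         vec.append([i, '1'])
--     vec1 = vec[:int(len(vec)/2)]
--     vec2 = vec[int(len(vec)/2):]
--     NFA = [[[] for i in range(0, n)] for j in range(0, n)]
--     for idx, (e1, e2) in enumerate(zip(vec1, vec2)):
--         NFA[idx][e1[0]] = [e1[1]]
--         NFA[idx][e2[0]] = [e2[1]]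
--     return NFA
-- ===== SOURCE B (Python) =====
-- def create_NFA(n):
--     # One direct pass: cell (s, j) holds ['b'] for the two edges s -> s//2 and
--     # s -> (n+s)//2; the (n+s)//2 edge wins when both land on the same cell,
--     # matching the original's assignment order.
--     return [[[str((n + s) % 2)] if j == (n + s) // 2
--              else [str(s % 2)] if j == s // 2
--              else []
--              for j in range(n)]
--             for s in range(n)]
-- ===== Notes on version B (the rewrite author's own statement) =====
-- stated objective: simpler
-- what changed: Replaced A's double-length index table (vec), its halving slices and the zip/enumerate pass that mutates a preallocated matrix with a single nested comprehension that computes every cell directly from the state and column via the s//2 and (n+s)//2 arithmetic.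
import Mathlib
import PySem

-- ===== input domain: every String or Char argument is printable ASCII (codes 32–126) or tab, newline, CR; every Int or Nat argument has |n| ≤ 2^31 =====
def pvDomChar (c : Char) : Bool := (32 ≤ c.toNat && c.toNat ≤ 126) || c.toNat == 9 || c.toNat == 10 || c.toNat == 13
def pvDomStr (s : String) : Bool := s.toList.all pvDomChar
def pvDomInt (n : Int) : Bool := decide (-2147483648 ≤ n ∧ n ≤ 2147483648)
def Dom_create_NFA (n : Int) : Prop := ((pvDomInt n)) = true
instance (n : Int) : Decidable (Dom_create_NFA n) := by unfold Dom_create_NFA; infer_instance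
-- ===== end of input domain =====

-- B replaces A's vec/zip/enumerate scaffolding and in-place mutation with one nested
-- comprehension computing each cell from s and j directly (objective: simpler).


-- ===== PORT A =====
def create_NFA (n : Int) : List (List (List String)) :=
  let vec : List (Int × String) :=
    (PySem.List.pyRange 0 n 1).foldl
      (fun acc i => (acc ++ [(i, "0")]) ++ [(i, "1")]) []
  -- int(len(vec)/2): exact as Nat division since len(vec) is even and nonnegative
  let h : Int := ((vec.length / 2 : Nat) : Int)
  let vec1 := PySem.List.slice vec none (some h)
  let vec2 := PySem.List.slice vec (some h) none
  let NFA : List (List (List String)) :=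
    (PySem.List.pyRange 0 n 1).map (fun _ =>
      (PySem.List.pyRange 0 n 1).map (fun _ => ([] : List String)))
  (PySem.List.enumerate (vec1.zip vec2) 0).foldl
    (fun m p =>
      let idx := p.1
      let e1 := p.2.1
      let e2 := p.2.2
      let m1 := PySem.List.pySetD m idx
        (PySem.List.pySetD (PySem.List.pyGetD m idx []) e1.1 [e1.2])
      PySem.List.pySetD m1 idx
        (PySem.List.pySetD (PySem.List.pyGetD m1 idx []) e2.1 [e2.2]))
    NFA

-- ===== PORT B =====
def create_NFA_alt (n : Int) : List (List (List String)) :=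
  (PySem.List.pyRange 0 n 1).map (fun s =>
    (PySem.List.pyRange 0 n 1).map (fun j =>
      if j = PySem.Int.floordiv (n + s) 2 then [PySem.Int.toStr (PySem.Int.mod (n + s) 2)]
      else if j = PySem.Int.floordiv s 2 then [PySem.Int.toStr (PySem.Int.mod s 2)]
      else ([] : List String)))

-- ===== PRECONDITION & SPEC =====
def Spec_create_NFA (n : Int) (out : List (List (List String))) : Prop := out = create_NFA_alt n
instance (n : Int) (out : List (List (List String))) : Decidable (Spec_create_NFA n out) := by unfold Spec_create_NFA; infer_instance

-- ===== CLAIM (what is proved, stated in full; the proofs are below) =====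
def Claim_equal_create_NFA : Prop := ∀ (n : Int), Dom_create_NFA n → Spec_create_NFA n (create_NFA n)

-- ===== LEMMAS AND PROOFS =====

-- the flat index table vec, over Nat
def pvVec (N : Nat) : List (Int × String) :=
  (List.range N).flatMap (fun i => [((i : Int), "0"), ((i : Int), "1")])

theorem pvVec_length (N : Nat) : (pvVec N).length = 2 * N := by
  induction N with
  | zero => rfl
  | succ N ih => simp [pvVec, List.range_succ] at ih ⊢; omega

theorem pvVec_get (N k : Nat) (hk : k < 2 * N) :
    (pvVec N)[k]'(by rw [pvVec_length]; exact hk) =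
      (((k / 2 : Nat) : Int), if k % 2 = 0 then "0" else "1") := by
  induction N with
  | zero => omega
  | succ N ih =>
    have hlen : (pvVec N).length = 2 * N := pvVec_length N
    have hsplit : pvVec (N + 1) = pvVec N ++ [((N : Int), "0"), ((N : Int), "1")] := by
      simp [pvVec, List.range_succ]
    rw [List.getElem_of_eq hsplit]
    by_cases h1 : k < 2 * N
    · rw [List.getElem_append_left (by omega)]
      exact ih h1
    · rw [List.getElem_append_right (by omega)]
      by_cases h2 : k = 2 * N
      · subst h2
        have e1 : 2 * N / 2 = N := by omega
        have e2 : 2 * N % 2 = 0 := by omega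
        simp [hlen, e1, e2]
      · have h3 : k = 2 * N + 1 := by omega
        subst h3
        have hd : 2 * N + 1 - (pvVec N).length = 1 := by omega
        have e1 : (2 * N + 1) / 2 = N := by omega
        have e2 : (2 * N + 1) % 2 = 1 := by omega
        simp [hd, e1, e2]

-- the empty row
def pvRow0 (N : Nat) : List (List String) := (List.range N).map (fun _ => ([] : List String))

-- fold of per-index row updates over range' a k, under the invariant that rows ≥ a are untouched
theorem pvFold_sets {R : Type} (d : R) (W : R → Nat → R)
    (step : List R → Nat → List R)
    (hstep : ∀ m i, i < m.length → step m i = m.set i (W (m.getD i d) i)) :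
    ∀ (k a : Nat) (m : List R), a + k ≤ m.length →
      ((List.range' a k).foldl step m).length = m.length ∧
      ∀ j, j < m.length →
        ((List.range' a k).foldl step m).getD j d =
          if a ≤ j ∧ j < a + k then W (m.getD j d) j else m.getD j d := by
  intro k
  induction k with
  | zero =>
    intro a m _
    refine ⟨rfl, fun j hj => ?_⟩
    rw [if_neg (by omega)]
    rfl
  | succ k ih =>
    intro a m hm
    have ha : a < m.length := by omega
    rw [List.range'_succ, List.foldl_cons, hstep m a ha]
    set m' := m.set a (W (m.getD a d) a) with hm'
    have hlen' : m'.length = m.length := by simp [hm']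
    obtain ⟨ihl, ihg⟩ := ih (a + 1) m' (by omega)
    refine ⟨by rw [ihl, hlen'], fun j hj => ?_⟩
    rw [ihg j (by omega)]
    have hgd : ∀ j, j < m.length → m'.getD j d = if j = a then W (m.getD a d) a else m.getD j d := by
      intro j _
      rw [hm', List.getD_eq_getElem?_getD, List.getElem?_set]
      by_cases h : j = a
      · subst h; simp [ha]
      · rw [if_neg (fun hh => h hh.symm), if_neg h, List.getD_eq_getElem?_getD]
    by_cases hja : j = a
    · subst hja
      rw [if_neg (by omega), hgd j ha, if_pos rfl, if_pos (by omega)]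
    · rw [hgd j hj]
      rw [if_neg hja]
      split_ifs with h1 h2 h2 <;> first | rfl | omega

-- the final row written by A's loop at state k equals B's comprehension row
theorem pvRow_eq (N k : Nat) (hk : k < N) :
    (((pvRow0 N).set (k / 2) [if k % 2 = 0 then "0" else "1"]).set ((N + k) / 2)
        [if (N + k) % 2 = 0 then "0" else "1"]) =
      (List.range N).map (fun (j : Nat) =>
        if ((j : Int)) = (((N + k) / 2 : Nat) : Int) then
          [PySem.Int.toStr (((N + k) % 2 : Nat) : Int)]
        else if ((j : Int)) = (((k / 2 : Nat) : Int)) then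
          [PySem.Int.toStr ((k % 2 : Nat) : Int)]
        else ([] : List String)) := by
  have h1 : k / 2 < N := by omega
  have h2 : (N + k) / 2 < N := by omega
  apply List.ext_getElem
  · simp [pvRow0]
  · intro j hja hjb
    simp only [List.getElem_map, List.getElem_range]
    have hjN : j < N := by simpa [pvRow0] using hjb
    rw [List.getElem_set, List.getElem_set]
    by_cases hA : (N + k) / 2 = j
    · rw [if_pos hA]
      have hc : ((j : Int)) = (((N + k) / 2 : Nat) : Int) := by exact_mod_cast hA.symm
      by_cases he : (N + k) % 2 = 0
      · rw [if_pos he, if_pos hc, he]; rfl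
      · have ho : (N + k) % 2 = 1 := by omega
        rw [if_neg he, if_pos hc, ho]; rfl
    · have hc : ¬ ((j : Int)) = (((N + k) / 2 : Nat) : Int) := fun hcc => hA (by exact_mod_cast hcc.symm)
      rw [if_neg hA, if_neg hc]
      by_cases hB : k / 2 = j
      · rw [if_pos hB]
        have hc2 : ((j : Int)) = (((k / 2 : Nat) : Nat) : Int) := by exact_mod_cast hB.symm
        by_cases he : k % 2 = 0
        · rw [if_pos he, if_pos hc2, he]; rfl
        · have ho : k % 2 = 1 := by omega
          rw [if_neg he, if_pos hc2, ho]; rfl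
      · have hc2 : ¬ ((j : Int)) = (((k / 2 : Nat) : Nat) : Int) := fun hcc => hB (by exact_mod_cast hcc.symm)
        rw [if_neg hB, if_neg hc2]
        simp [pvRow0]

theorem pvGetD_set {α : Type} (m : List α) (i : Nat) (h : i < m.length) (v d : α) :
    (m.set i v).getD i d = v := by
  rw [List.getD_eq_getElem?_getD, List.getElem?_set]
  simp [h]

theorem pvFoldA (zl : List ((Int × String) × (Int × String))) (d0 : (Int × String) × (Int × String))
    (N : Nat) (m : List (List (List String))) (hm : N ≤ m.length) :
    ((List.range N).foldl
        (fun x y =>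
          (x.set y (PySem.List.pySetD (x.getD y []) (zl.getD y d0).1.1 [(zl.getD y d0).1.2])).set y
            (PySem.List.pySetD
              ((x.set y (PySem.List.pySetD (x.getD y []) (zl.getD y d0).1.1 [(zl.getD y d0).1.2])).getD y [])
              (zl.getD y d0).2.1 [(zl.getD y d0).2.2])) m).length = m.length ∧
      ∀ j, j < m.length →
        ((List.range N).foldl
            (fun x y =>
              (x.set y (PySem.List.pySetD (x.getD y []) (zl.getD y d0).1.1 [(zl.getD y d0).1.2])).set y
                (PySem.List.pySetD
                  ((x.set y (PySem.List.pySetD (x.getD y []) (zl.getD y d0).1.1 [(zl.getD y d0).1.2])).getD y [])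
                  (zl.getD y d0).2.1 [(zl.getD y d0).2.2])) m).getD j [] =
          if j < N then
            PySem.List.pySetD
              (PySem.List.pySetD (m.getD j []) (zl.getD j d0).1.1 [(zl.getD j d0).1.2])
              (zl.getD j d0).2.1 [(zl.getD j d0).2.2]
          else m.getD j [] := by
  obtain ⟨h1, h2⟩ := pvFold_sets ([] : List (List String))
    (fun r i =>
      PySem.List.pySetD (PySem.List.pySetD r (zl.getD i d0).1.1 [(zl.getD i d0).1.2])
        (zl.getD i d0).2.1 [(zl.getD i d0).2.2])
    (fun x y =>
      (x.set y (PySem.List.pySetD (x.getD y []) (zl.getD y d0).1.1 [(zl.getD y d0).1.2])).set y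
        (PySem.List.pySetD
          ((x.set y (PySem.List.pySetD (x.getD y []) (zl.getD y d0).1.1 [(zl.getD y d0).1.2])).getD y [])
          (zl.getD y d0).2.1 [(zl.getD y d0).2.2]))
    (by
      intro mm i hi
      simp only
      rw [pvGetD_set mm i hi, List.set_set])
    N 0 m (by omega)
  rw [← List.range_eq_range'] at h1 h2
  refine ⟨h1, fun j hj => ?_⟩
  rw [h2 j hj]
  split_ifs with hc hd hd <;> first | rfl | omega

theorem pvFlat (N : Nat) : List.flatMap (fun (k : Nat) => [((k : Int), "0"), ((k : Int), "1")]) (List.range N) =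
    List.flatMap (fun (i : Int) => [(i, "0"), (i, "1")]) (List.flatMap (fun (a : Nat) => [(a : Int)]) (List.range N)) := by
  induction N with
  | zero => rfl
  | succ n ih => simp [List.range_succ, ih]

-- main equality for nonnegative n = ↑N
theorem pv_main (N : Nat) : create_NFA (N : Int) = create_NFA_alt (N : Int) := by
  have hR := PySem.List.pyRange_zero_natCast N
  simp only [create_NFA, create_NFA_alt]
  rw [hR]
  have hvec : List.foldl (fun acc i => acc ++ [(i, "0")] ++ [(i, "1")]) ([] : List (Int × String))
      (List.map (fun (k : Nat) => (k : Int)) (List.range N)) = pvVec N := by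
    rw [List.foldl_map]
    have hfun : (fun (acc : List (Int × String)) (k : Nat) => acc ++ [((k : Int), "0")] ++ [((k : Int), "1")])
        = fun (acc : List (Int × String)) (k : Nat) => acc ++ [((k : Int), "0"), ((k : Int), "1")] := by
      funext acc k; simp
    rw [hfun, PySem.List.foldl_append_eq_flatMap]
    rw [List.nil_append, pvVec]
    exact pvFlat N
  rw [hvec, pvVec_length]
  have hdiv : 2 * N / 2 = N := by omega
  rw [hdiv, PySem.List.slice_to_natCast, PySem.List.slice_from_natCast]
  have hM0 : List.map (fun x => List.map (fun x => ([] : List String)) (List.map (fun (k : Nat) => (k : Int)) (List.range N)))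
      (List.map (fun (k : Nat) => (k : Int)) (List.range N)) = List.map (fun _ => pvRow0 N) (List.range N) := by
    simp only [List.map_map]
    rfl
  rw [hM0]
  rw [PySem.List.enumerate_eq_map_pyRange ((List.take N (pvVec N)).zip (List.drop N (pvVec N)))
      ((((0 : Int), ""), ((0 : Int), "")))]
  rw [PySem.List.len_eq]
  have hzlen : ((List.take N (pvVec N)).zip (List.drop N (pvVec N))).length = N := by
    simp [pvVec_length]; omega
  rw [hzlen, hR, List.foldl_map]
  rw [List.foldl_map]
  simp only [PySem.List.pySetD_natCast, PySem.List.pyGetD_natCast]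
  obtain ⟨hL, hG⟩ := pvFoldA ((List.take N (pvVec N)).zip (List.drop N (pvVec N)))
      (((0 : Int), ""), ((0 : Int), "")) N (List.map (fun _ => pvRow0 N) (List.range N)) (by simp)
  have hM0len : (List.map (fun _ => pvRow0 N) (List.range N)).length = N := by simp
  apply List.ext_getElem
  · rw [hL, hM0len]; simp
  · intro k hk1 hk2
    have hkN : k < N := by rw [hL, hM0len] at hk1; exact hk1
    have hget : ∀ (l : List (List (List String))) (hk : k < l.length), l[k]'hk = l.getD k [] := by
      intro l hk
      rw [List.getD_eq_getElem?_getD, List.getElem?_eq_getElem hk]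
      rfl
    rw [hget _ hk1, hG k (by rw [hM0len]; exact hkN), if_pos hkN]
    -- the initial row is the empty row
    have hinit : (List.map (fun _ => pvRow0 N) (List.range N)).getD k [] = pvRow0 N := by
      rw [List.getD_eq_getElem?_getD, List.getElem?_map, List.getElem?_range hkN]
      rfl
    rw [hinit]
    -- the zipped table entry at k
    have hzk : ((List.take N (pvVec N)).zip (List.drop N (pvVec N))).getD k
        (((0 : Int), ""), ((0 : Int), "")) =
        (((((k / 2 : Nat)) : Int), if k % 2 = 0 then "0" else "1"),
         (((((N + k) / 2 : Nat)) : Int), if (N + k) % 2 = 0 then "0" else "1")) := by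
      have hklt : k < ((List.take N (pvVec N)).zip (List.drop N (pvVec N))).length := by
        rw [hzlen]; exact hkN
      rw [List.getD_eq_getElem?_getD, List.getElem?_eq_getElem hklt]
      rw [List.getElem_zip]
      have h1 : (List.take N (pvVec N))[k]'(by simp [pvVec_length]; omega) =
          ((((k / 2 : Nat)) : Int), if k % 2 = 0 then "0" else "1") := by
        rw [List.getElem_take]
        exact pvVec_get N k (by omega)
      have h2 : (List.drop N (pvVec N))[k]'(by simp [pvVec_length]; omega) =
          (((((N + k) / 2 : Nat)) : Int), if (N + k) % 2 = 0 then "0" else "1") := by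
        rw [List.getElem_drop]
        exact pvVec_get N (N + k) (by omega)
      rw [h1, h2]
      rfl
    rw [hzk]
    simp only [PySem.List.pySetD_natCast]
    -- the RHS entry at k
    rw [hget _ hk2]
    have hrhs : (List.map
          (fun s =>
            List.map
              (fun j =>
                if j = PySem.Int.floordiv (↑N + s) 2 then [PySem.Int.toStr (PySem.Int.mod (↑N + s) 2)]
                else if j = PySem.Int.floordiv s 2 then [PySem.Int.toStr (PySem.Int.mod s 2)] else [])
              (List.map (fun (k : Nat) => (k : Int)) (List.range N)))
          (List.map (fun (k : Nat) => (k : Int)) (List.range N))).getD k [] =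
        List.map
          (fun j =>
            if j = PySem.Int.floordiv ((N : Int) + (k : Int)) 2 then
              [PySem.Int.toStr (PySem.Int.mod ((N : Int) + (k : Int)) 2)]
            else if j = PySem.Int.floordiv (k : Int) 2 then [PySem.Int.toStr (PySem.Int.mod (k : Int) 2)]
            else [])
          (List.map (fun (k : Nat) => (k : Int)) (List.range N)) := by
      rw [List.getD_eq_getElem?_getD, List.getElem?_map, List.getElem?_map, List.getElem?_range hkN]
      rfl
    rw [hrhs, pvRow_eq N k hkN, List.map_map]
    apply List.map_congr_left
    intro j _
    have hadd : ((N : Int) + (k : Int)) = ((N + k : Nat) : Int) := by push_cast; ring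
    have h2c : (2 : Int) = ((2 : Nat) : Int) := rfl
    show (if ((j : Int)) = (((N + k) / 2 : Nat) : Int) then [PySem.Int.toStr (((N + k) % 2 : Nat) : Int)]
      else if ((j : Int)) = (((k / 2 : Nat) : Int)) then [PySem.Int.toStr ((k % 2 : Nat) : Int)]
      else ([] : List String)) = _
    rw [hadd, h2c, PySem.Int.floordiv_natCast, PySem.Int.mod_natCast, PySem.Int.floordiv_natCast,
      PySem.Int.mod_natCast]
    rfl

-- ===== VERDICT (by name: the statement is the Claim_ definition above) =====
theorem create_NFA_spec : Claim_equal_create_NFA := by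
  intro n _
  unfold Spec_create_NFA
  rcases Int.lt_or_le n 0 with h | h
  · have hr : PySem.List.pyRange 0 n 1 = [] := PySem.List.pyRange_one_eq_nil (by omega)
    simp [create_NFA, create_NFA_alt, hr]
  · obtain ⟨N, rfl⟩ := Int.eq_ofNat_of_zero_le h
    exact pv_main N
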